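-- pv_equiv track=rewrite | github.com/WTCSC/ip-freely-Fooot-Code | ip_freely.py | findMaskBinary
-- ===== SOURCE A (Python) =====
-- def findMaskBinary(subnetMask):
--     """
--     Finds the binary version of the subnet mask
--
--     :param subnetMask: string of a CIDR formatted subnet mask (/24, /32, /16, etc.)
--     """
--
--     maskBinary = ""
--     for i in range(32):
--         if i < int(subnetMask):
--             maskBinary += "1"
--         else:
--             maskBinary += "0"
--     return maskBinary
-- ===== SOURCE B (Python) =====
-- def findMaskBinary(subnetMask):
--     """
--     Finds the binary version of the subnet mask
--
--     :param subnetMask: string of a CIDR formatted subnet mask (/24, /32, /16, etc.)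
--     """
--     n = int(subnetMask)
--     ones = min(max(n, 0), 32)
--     return "1" * ones + "0" * (32 - ones)
-- ===== Notes on version B (the rewrite author's own statement) =====
-- stated objective: simpler
-- what changed: Replaces the 32-iteration character-by-character loop with a closed-form string built by multiplication: ones = min(max(int(subnetMask),0),32), then '1'*ones + '0'*(32-ones).
import Mathlib
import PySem

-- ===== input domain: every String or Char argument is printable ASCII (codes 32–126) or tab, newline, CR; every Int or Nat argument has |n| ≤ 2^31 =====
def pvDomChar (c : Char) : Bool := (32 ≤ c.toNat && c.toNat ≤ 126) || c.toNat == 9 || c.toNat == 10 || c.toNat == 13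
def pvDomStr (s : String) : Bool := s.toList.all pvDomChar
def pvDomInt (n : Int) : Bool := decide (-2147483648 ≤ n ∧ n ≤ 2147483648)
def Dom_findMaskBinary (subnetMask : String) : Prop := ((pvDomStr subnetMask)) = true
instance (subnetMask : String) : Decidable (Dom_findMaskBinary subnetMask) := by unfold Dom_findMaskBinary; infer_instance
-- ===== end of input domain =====

-- B replaces A's 32-iteration character loop with the closed form "1"*ones ++ "0"*(32-ones), ones clamped to 0..32.

-- ===== PORT A =====
def findMaskBinary (subnetMask : String) : String :=
  match PySem.Int.ofStr? subnetMask with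
  | none => ""  -- int(subnetMask) raises ValueError; excluded by Pre_
  | some n =>
    (PySem.List.pyRange 0 32 1).foldl
      (fun maskBinary i => if i < n then maskBinary ++ "1" else maskBinary ++ "0") ""

-- ===== PORT B =====
def findMaskBinary_alt (subnetMask : String) : String :=
  match PySem.Int.ofStr? subnetMask with
  | none => ""  -- int(subnetMask) raises ValueError; excluded by Pre_
  | some n =>
    let ones := (min (max n 0) 32).toNat
    String.mk (List.replicate ones '1') ++ String.mk (List.replicate (32 - ones) '0')

-- ===== PRECONDITION & SPEC =====
-- Pre_ excludes exactly the strings on which int(subnetMask) raises ValueError.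
def Pre_findMaskBinary (subnetMask : String) : Prop :=
  (PySem.Int.ofStr? subnetMask).isSome = true
instance (subnetMask : String) : Decidable (Pre_findMaskBinary subnetMask) := by
  unfold Pre_findMaskBinary; infer_instance
def pvWitness_findMaskBinary : String := "24"

def Spec_findMaskBinary (subnetMask : String) (out : String) : Prop := out = findMaskBinary_alt subnetMask
instance (subnetMask : String) (out : String) : Decidable (Spec_findMaskBinary subnetMask out) := by unfold Spec_findMaskBinary; infer_instance

-- ===== CLAIM (what is proved, stated in full; the proofs are below) =====
def Claim_equal_findMaskBinary : Prop := ∀ (subnetMask : String), Dom_findMaskBinary subnetMask → Pre_findMaskBinary subnetMask → Spec_findMaskBinary subnetMask (findMaskBinary subnetMask)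

-- ===== LEMMAS AND PROOFS =====
lemma fold_eq_closed (n : Int) :
    (PySem.List.pyRange 0 32 1).foldl
      (fun maskBinary i => if i < n then maskBinary ++ "1" else maskBinary ++ "0") ""
    = String.mk (List.replicate (min (max n 0) 32).toNat '1')
      ++ String.mk (List.replicate (32 - (min (max n 0) 32).toNat) '0') := by
  set ones := (min (max n 0) 32).toNat with hones
  have hle : ones ≤ 32 := by omega
  have hcong : ∀ (acc : String) (i : Int), i ∈ PySem.List.pyRange 0 32 1 →
      (if i < n then acc ++ "1" else acc ++ "0")
      = (if i < (ones : Int) then acc ++ "1" else acc ++ "0") := by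
    intro acc i hi
    rw [PySem.List.mem_pyRange_one] at hi
    have : (i < n) ↔ (i < (ones : Int)) := by omega
    simp only [this]
  rw [PySem.List.foldl_congr_mem _ _ _ _ hcong]
  clear hcong hones
  interval_cases ones <;> decide

theorem findMaskBinary_spec : Claim_equal_findMaskBinary := by
  intro s _ hpre
  unfold Spec_findMaskBinary findMaskBinary findMaskBinary_alt
  cases h : PySem.Int.ofStr? s with
  | none => rfl
  | some n => simpa using fold_eq_closed n
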